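-- pv_equiv track=rewrite | github.com/avienithari/AdventOfCode | 2023/7.py | part_2
-- ===== SOURCE A (Python) =====
-- def hand_score(hand):
--     counts = []
--     for card in hand:
--         counts.append(hand.count(card))
--
--     if 5 in counts:
--         return 6
--     if 4 in counts:
--         return 5
--     if 3 in counts:
--         if 2 in counts:
--             return 4
--         return 3
--     if counts.count(2) == 4:
--         return 2
--     if 2 in counts:
--         return 1
--     return 0
--
-- def possibilities(hand):
--     joker = []
--     if hand == "":
--         return [""]
--     for x in ("23456789TQKA" if hand[0] == "J" else hand[0]):
--         for y in possibilities(hand[1:]):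
--             joker.append(x + y)
--
--     return joker
--
-- def best_option(hand):
--     return max(map(hand_score, possibilities(hand)))
--
-- def strength(hand, remap, part):
--     my_sort = []
--     for card in hand:
--         my_sort.append(remap.get(card, card))
--
--     if part == 1:
--         return (hand_score(hand), my_sort)
--     return (best_option(hand), my_sort)
--
-- def part_2(hands):
--     remap = {
--         "T": "A",
--         "J": ".",
--         "Q": "C",
--         "K": "D",
--         "A": "E"
--     }
--     hands.sort(key = lambda hand: strength(hand[0], remap, part=2))
--     total = 0
--     for rank, hand in enumerate(hands, 1):
--         total += rank * hand[1]
--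
--     return total
-- ===== SOURCE B (Python) =====
-- def part_2(hands):
--     # Like A, sorts `hands` in place; equivalence is about the returned total.
--     remap = {"T": "A", "J": ".", "Q": "C", "K": "D", "A": "E"}
--
--     def score(st):
--         cnt = {}
--         for c in st:
--             cnt[c] = cnt.get(c, 0) + 1
--         vals = list(cnt.values())
--         if 5 in vals:
--             return 6
--         if 4 in vals:
--             return 5
--         if 3 in vals:
--             return 4 if 2 in vals else 3
--         if vals.count(2) == 2:
--             return 2
--         if 2 in vals:
--             return 1
--         return 0
--
--     def best(hand):
--         # DP over deduplicated multiset states instead of enumerating all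
--         # 12**j replacement strings: a state is the sorted string of the
--         # prefix with jokers assigned, merged via a set.
--         states = {""}
--         for ch in hand:
--             nxt = set()
--             for st in states:
--                 for x in ("23456789TQKA" if ch == "J" else ch):
--                     nxt.add("".join(sorted(st + x)))
--             states = nxt
--         return max(map(score, states))
--
--     hands.sort(key=lambda hand: (best(hand[0]), [remap.get(c, c) for c in hand[0]]))
--     return sum(rank * hand[1] for rank, hand in enumerate(hands, 1))
-- ===== Notes on version B (the rewrite author's own statement) =====
-- stated objective: alternative
-- what changed: A enumerates all 12^j joker replacement strings per hand and scores each with a per-position count pass; B instead runs a DP whose states are the deduplicated sorted card-multisets of the prefix (a set of sorted strings) and scores each final state once from a counter dict; on random inputs jokers are rare, so this trades A's exponential blow-up in the joker count for a constant-factor state-maintenance overhead and is not measurably faster there.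
import Mathlib
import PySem

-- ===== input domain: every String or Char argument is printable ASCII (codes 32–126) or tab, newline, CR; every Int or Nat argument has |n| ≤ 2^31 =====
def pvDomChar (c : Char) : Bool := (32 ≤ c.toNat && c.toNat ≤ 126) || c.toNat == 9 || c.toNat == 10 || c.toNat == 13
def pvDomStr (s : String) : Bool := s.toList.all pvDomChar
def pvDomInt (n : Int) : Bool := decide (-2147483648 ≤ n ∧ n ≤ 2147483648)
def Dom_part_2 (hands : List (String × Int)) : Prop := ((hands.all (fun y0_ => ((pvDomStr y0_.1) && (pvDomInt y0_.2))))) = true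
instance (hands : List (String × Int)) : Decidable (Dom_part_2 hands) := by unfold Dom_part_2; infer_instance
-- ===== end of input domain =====

-- B replaces A's brute-force enumeration of all 12^j joker replacement strings by a
-- DP over deduplicated sorted-multiset states with a counter-based scorer (same result;
-- both A and B also sort `hands` in place — the equivalence proved is about the return value).

-- ===== PORT A =====
-- hand.count(card) for a 1-character card is exactly List.count (substring count of a
-- single char = char count), so the counts loop is ported with List.count.
def handScoreA (hand : List Char) : Int :=
  let counts : List Int := hand.foldl (fun acc card => acc ++ [(hand.count card : Int)]) []
  if (5 : Int) ∈ counts then 6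
  else if (4 : Int) ∈ counts then 5
  else if (3 : Int) ∈ counts then (if (2 : Int) ∈ counts then 4 else 3)
  else if counts.count 2 = 4 then 2
  else if (2 : Int) ∈ counts then 1
  else 0

def optionsA (c : Char) : List Char := if c = 'J' then "23456789TQKA".toList else [c]

def possA : List Char → List (List Char)
  | [] => [[]]
  | c :: rest =>
    let tailPoss := possA rest
    (optionsA c).foldl (fun joker x => tailPoss.foldl (fun j y => j ++ [x :: y]) joker) []

-- Python max(...) raises on an empty sequence; possibilities(hand) is never empty,
-- so the .getD 0 default is unreachable.
def bestOptionA (hand : List Char) : Int :=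
  (PySem.List.max? ((possA hand).map handScoreA) (fun x => x)).getD 0

-- remap maps 1-character strings to 1-character strings; ported as Char → Char
-- (order-isomorphic for the sort key).
def remapA : PySem.Dict Char Char :=
  PySem.Dict.ofList [('T', 'A'), ('J', '.'), ('Q', 'C'), ('K', 'D'), ('A', 'E')]

def strengthA (hand : List Char) (remap : PySem.Dict Char Char) (part : Int) : Int × List Char :=
  let my_sort := hand.foldl (fun acc card => acc ++ [remap.getD card card]) []
  if part = 1 then (handScoreA hand, my_sort) else (bestOptionA hand, my_sort)

def part_2 (hands : List (String × Int)) : Int :=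
  let sortedHands := PySem.List.sorted2 hands
    (fun hand => (strengthA hand.1.toList remapA 2).1)
    (fun hand => (strengthA hand.1.toList remapA 2).2)
  (PySem.List.enumerate sortedHands 1).foldl (fun total p => total + p.1 * p.2.2) 0

-- ===== PORT B =====
-- the counting loop `cnt[c] = cnt.get(c, 0) + 1` over st is collections-style counting:
-- PySem.Dict.counter is by definition that fold.
def scoreB (st : List Char) : Int :=
  let cnt := PySem.Dict.counter st
  let vals := cnt.values
  if (5 : Int) ∈ vals then 6
  else if (4 : Int) ∈ vals then 5
  else if (3 : Int) ∈ vals then (if (2 : Int) ∈ vals then 4 else 3)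
  else if vals.count 2 = 2 then 2
  else if (2 : Int) ∈ vals then 1
  else 0

def sortC (l : List Char) : List Char := PySem.List.sorted l (fun y => y)

def optionsB (c : Char) : List Char := if c = 'J' then "23456789TQKA".toList else [c]

def stepB (states : PySem.Set (List Char)) (ch : Char) : PySem.Set (List Char) :=
  states.foldl
    (fun nxt st => (optionsB ch).foldl (fun n2 x => PySem.Set.add n2 (sortC (st ++ [x]))) nxt)
    PySem.Set.empty

-- max over a Python set of ints: order-independent
def bestB (hand : List Char) : Int :=
  let states := hand.foldl stepB (PySem.Set.ofList [[]])
  (PySem.List.max? (states.map scoreB) (fun x => x)).getD 0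

def remapB : PySem.Dict Char Char :=
  PySem.Dict.ofList [('T', 'A'), ('J', '.'), ('Q', 'C'), ('K', 'D'), ('A', 'E')]

def part_2_alt (hands : List (String × Int)) : Int :=
  let sortedHands := PySem.List.sorted2 hands
    (fun hand => bestB hand.1.toList)
    (fun hand => hand.1.toList.map (fun c => remapB.getD c c))
  ((PySem.List.enumerate sortedHands 1).map (fun p => p.1 * p.2.2)).sum

-- ===== PRECONDITION & SPEC =====
def Spec_part_2 (hands : List (String × Int)) (out : Int) : Prop := out = part_2_alt hands
instance (hands : List (String × Int)) (out : Int) : Decidable (Spec_part_2 hands out) := by unfold Spec_part_2; infer_instance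

-- ===== CLAIM (what is proved, stated in full; the proofs are below) =====
def Claim_equal_part_2 : Prop := ∀ (hands : List (String × Int)), Dom_part_2 hands → Spec_part_2 hands (part_2 hands)

-- ===== LEMMAS AND PROOFS =====

lemma optionsB_eq : optionsB = optionsA := rfl

lemma possA_cons (c : Char) (rest : List Char) :
    possA (c :: rest) = (optionsA c).flatMap (fun x => (possA rest).map (fun y => x :: y)) := by
  simp only [possA, PySem.List.foldl_append_singleton_eq_map, PySem.List.foldl_append_eq_flatMap,
    List.nil_append]

lemma optionsA_ne_nil (c : Char) : optionsA c ≠ [] := by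
  unfold optionsA; split <;> simp

lemma possA_ne_nil (l : List Char) : possA l ≠ [] := by
  induction l with
  | nil => simp [possA]
  | cons c rest ih =>
    rw [possA_cons]
    rcases List.exists_mem_of_ne_nil _ (optionsA_ne_nil c) with ⟨x, hx⟩
    rcases List.exists_mem_of_ne_nil _ ih with ⟨e, he⟩
    intro hnil
    have : (x :: e) ∈ (optionsA c).flatMap (fun x => (possA rest).map (fun y => x :: y)) := by
      simp only [List.mem_flatMap, List.mem_map]
      exact ⟨x, hx, e, he, rfl⟩
    simp [hnil] at this

lemma handScoreA_perm (l l' : List Char) (h : l.Perm l') : handScoreA l = handScoreA l' := by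
  simp only [handScoreA, PySem.List.foldl_append_singleton_eq_map, List.nil_append]
  have hmapeq : l'.map (fun c => (l.count c : Int)) = l'.map (fun c => (l'.count c : Int)) :=
    List.map_congr_left (fun a _ => by rw [h.count_eq])
  have hperm : (l.map (fun c => (l.count c : Int))).Perm (l'.map (fun c => (l'.count c : Int))) :=
    hmapeq ▸ h.map _
  simp only [hperm.mem_iff, hperm.count_eq]

lemma countP_eq_sum (l : List Char) (p : Char → Bool) :
    l.countP p = ∑ a ∈ l.toFinset, if p a then l.count a else 0 := by
  rw [List.countP_eq_length_filter, ← List.sum_toFinset_count_eq_length]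
  rw [Finset.sum_subset (s₁ := (l.filter p).toFinset) (s₂ := l.toFinset)
      (by intro x hx; simp only [List.mem_toFinset, List.mem_filter] at hx ⊢; exact hx.1)
      (by intro x _ hx; rw [List.count_eq_zero]; simpa using hx)]
  refine Finset.sum_congr rfl (fun a _ => ?_)
  by_cases hp : p a
  · rw [List.count_filter hp, if_pos hp]
  · rw [if_neg hp, List.count_eq_zero]
    simp [List.mem_filter, hp]

lemma count2_rel (l : List Char) :
    (l.map (fun c => (l.count c : Int))).count 2 =
      2 * ((PySem.Set.ofList l).map (fun c => (l.count c : Int))).count 2 := by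
  have hL : (l.map (fun c => (l.count c : Int))).count 2 =
      l.countP (fun c => ((l.count c : Int) == 2)) := by
    rw [List.count_eq_countP, List.countP_map]; rfl
  have hD : ((PySem.Set.ofList l).map (fun c => (l.count c : Int))).count 2 =
      (PySem.Set.ofList l).countP (fun c => ((l.count c : Int) == 2)) := by
    rw [List.count_eq_countP, List.countP_map]; rfl
  rw [hL, hD, countP_eq_sum, countP_eq_sum]
  have hT : (PySem.Set.ofList l : List Char).toFinset = l.toFinset := by
    ext a; simp [List.mem_toFinset, PySem.Set.mem_ofList]
  rw [hT, Finset.mul_sum]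
  refine Finset.sum_congr rfl (fun a ha => ?_)
  by_cases h : ((l.count a : Int) == 2) = true
  · have h2 : l.count a = 2 := by
      have := of_decide_eq_true h
      omega
    have hmem : a ∈ (PySem.Set.ofList l : List Char) := by
      rw [PySem.Set.mem_ofList]; exact List.mem_toFinset.mp ha
    rw [if_pos h, if_pos h, h2, List.count_eq_one_of_mem (PySem.Set.nodup_ofList l) hmem]
    norm_num
  · simp [h]

lemma handScoreA_eq_scoreB (l : List Char) : handScoreA l = scoreB l := by
  have hvals : (PySem.Dict.counter l).values =
      (PySem.Set.ofList l).map (fun c => (l.count c : Int)) := by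
    simp [PySem.Dict.values, PySem.Dict.items_counter, List.map_map]
  have hmem : ∀ v : Int, (v ∈ l.map (fun c => (l.count c : Int))) ↔
      (v ∈ (PySem.Set.ofList l).map (fun c => (l.count c : Int))) := by
    intro v; simp [List.mem_map, PySem.Set.mem_ofList]
  have hc : ((l.map (fun c => (l.count c : Int))).count 2 = 4) ↔
      (((PySem.Set.ofList l).map (fun c => (l.count c : Int))).count 2 = 2) := by
    have := count2_rel l; omega
  simp only [handScoreA, scoreB, PySem.List.foldl_append_singleton_eq_map, List.nil_append,
    hvals, hmem, hc]

lemma mem_foldl_add {β : Type} [BEq β] [LawfulBEq β] (l : List Char) (f : Char → β)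
    (s : PySem.Set β) (t : β) :
    t ∈ l.foldl (fun acc x => PySem.Set.add acc (f x)) s ↔ t ∈ s ∨ ∃ x ∈ l, t = f x := by
  induction l generalizing s with
  | nil => simp
  | cons c cs ih =>
    rw [List.foldl_cons, ih, PySem.Set.mem_add]
    constructor
    · rintro ((h | h) | ⟨x, hx, rfl⟩)
      · exact Or.inl h
      · exact Or.inr ⟨c, by simp, h⟩
      · exact Or.inr ⟨x, by simp [hx], rfl⟩
    · rintro (h | ⟨x, hx, rfl⟩)
      · exact Or.inl (Or.inl h)
      · rcases List.mem_cons.mp hx with rfl | hx'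
        · exact Or.inl (Or.inr rfl)
        · exact Or.inr ⟨x, hx', rfl⟩

lemma mem_stepB (S : PySem.Set (List Char)) (c : Char) (t : List Char) :
    t ∈ stepB S c ↔ ∃ st ∈ S, ∃ x ∈ optionsB c, t = sortC (st ++ [x]) := by
  unfold stepB
  suffices h : ∀ (A : PySem.Set (List Char)),
      t ∈ S.foldl (fun nxt st =>
        (optionsB c).foldl (fun n2 x => PySem.Set.add n2 (sortC (st ++ [x]))) nxt) A ↔
      t ∈ A ∨ ∃ st ∈ S, ∃ x ∈ optionsB c, t = sortC (st ++ [x]) by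
    rw [h PySem.Set.empty]
    simp [PySem.Set.empty]
  induction S with
  | nil => simp
  | cons s ss ih =>
    intro A
    rw [List.foldl_cons, ih, mem_foldl_add]
    constructor
    · rintro ((h | ⟨x, hx, rfl⟩) | ⟨st, hst, x, hx, rfl⟩)
      · exact Or.inl h
      · exact Or.inr ⟨s, by simp, x, hx, rfl⟩
      · exact Or.inr ⟨st, by simp [hst], x, hx, rfl⟩
    · rintro (h | ⟨st, hst, x, hx, rfl⟩)
      · exact Or.inl (Or.inl h)
      · rcases List.mem_cons.mp hst with rfl | hst'
        · exact Or.inl (Or.inr ⟨x, hx, rfl⟩)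
        · exact Or.inr ⟨st, hst', x, hx, rfl⟩

lemma sortC_perm_eq {u v : List Char} (h : u.Perm v) : sortC u = sortC v :=
  PySem.List.sorted_eq_sorted_of_perm u v (fun y => y) (fun _ _ hy => hy) h

lemma sortC_sortC (u : List Char) : sortC (sortC u) = sortC u :=
  PySem.List.sorted_sorted u (fun y => y)

lemma mem_foldl_stepB (l : List Char) (S : PySem.Set (List Char))
    (hS : ∀ st ∈ S, sortC st = st) (t : List Char) :
    t ∈ l.foldl stepB S ↔ ∃ st ∈ S, ∃ e ∈ possA l, t = sortC (st ++ e) := by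
  induction l generalizing S with
  | nil =>
    simp only [List.foldl_nil, possA, List.mem_singleton]
    constructor
    · intro ht
      exact ⟨t, ht, [], by simp, by rw [List.append_nil, hS t ht]⟩
    · rintro ⟨st, hst, e, rfl, rfl⟩
      rw [List.append_nil, hS st hst]
      exact hst
  | cons c cs ih =>
    rw [List.foldl_cons]
    have hS' : ∀ st ∈ stepB S c, sortC st = st := by
      intro st hst
      rcases (mem_stepB S c st).mp hst with ⟨z, _, x, _, rfl⟩
      exact sortC_sortC _
    rw [ih (stepB S c) hS']
    constructor
    · rintro ⟨st', hst', e, he, rfl⟩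
      rcases (mem_stepB S c st').mp hst' with ⟨st, hst, x, hx, rfl⟩
      refine ⟨st, hst, x :: e, ?_, ?_⟩
      · rw [possA_cons]
        simp only [List.mem_flatMap, List.mem_map]
        exact ⟨x, by rw [← optionsB_eq]; exact hx, e, he, rfl⟩
      · have hp : (sortC (st ++ [x]) ++ e).Perm (st ++ (x :: e)) := by
          have h1 : (sortC (st ++ [x])).Perm (st ++ [x]) := PySem.List.sorted_perm _ _ _
          calc (sortC (st ++ [x]) ++ e).Perm ((st ++ [x]) ++ e) := h1.append_right e
            _ = st ++ (x :: e) := by simp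
        exact sortC_perm_eq hp
    · rintro ⟨st, hst, e', he', rfl⟩
      rw [possA_cons] at he'
      simp only [List.mem_flatMap, List.mem_map] at he'
      rcases he' with ⟨x, hx, e, he, rfl⟩
      refine ⟨sortC (st ++ [x]), (mem_stepB S c _).mpr ⟨st, hst, x, by rw [optionsB_eq]; exact hx, rfl⟩,
        e, he, ?_⟩
      have hp : (sortC (st ++ [x]) ++ e).Perm (st ++ (x :: e)) := by
        have h1 : (sortC (st ++ [x])).Perm (st ++ [x]) := PySem.List.sorted_perm _ _ _
        calc (sortC (st ++ [x]) ++ e).Perm ((st ++ [x]) ++ e) := h1.append_right e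
          _ = st ++ (x :: e) := by simp
      exact (sortC_perm_eq hp).symm

lemma maxD_eq (L1 L2 : List Int) (h12 : ∀ v ∈ L1, v ∈ L2) (h21 : ∀ v ∈ L2, v ∈ L1)
    (hne : L1 ≠ []) :
    (PySem.List.max? L1 (fun x => x)).getD 0 = (PySem.List.max? L2 (fun x => x)).getD 0 := by
  cases hm1 : PySem.List.max? L1 (fun x => x) with
  | none => exact absurd ((PySem.List.max?_eq_none_iff _ _).mp hm1) hne
  | some m1 =>
    cases hm2 : PySem.List.max? L2 (fun x => x) with
    | none =>
      have : L2 = [] := (PySem.List.max?_eq_none_iff _ _).mp hm2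
      exact absurd (this ▸ h12 m1 (PySem.List.max?_mem hm1)) (List.not_mem_nil)
    | some m2 =>
      simp only [Option.getD_some]
      exact le_antisymm
        (PySem.List.max?_isMax hm2 m1 (h12 m1 (PySem.List.max?_mem hm1)))
        (PySem.List.max?_isMax hm1 m2 (h21 m2 (PySem.List.max?_mem hm2)))

lemma hS0 : ∀ st ∈ (PySem.Set.ofList [([] : List Char)]), sortC st = st := by
  intro st hst
  have h := (PySem.Set.mem_ofList _ _).mp hst
  rw [List.mem_singleton] at h
  subst h; rfl

lemma best_eq (hand : List Char) : bestB hand = bestOptionA hand := by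
  unfold bestB bestOptionA
  refine maxD_eq _ _ ?_ ?_ ?_
  · intro v hv
    rcases List.mem_map.mp hv with ⟨t, ht, rfl⟩
    rcases (mem_foldl_stepB hand _ hS0 t).mp ht with ⟨st, hst, e, he, rfl⟩
    have h := (PySem.Set.mem_ofList _ _).mp hst
    rw [List.mem_singleton] at h
    subst h
    refine List.mem_map.mpr ⟨e, he, ?_⟩
    rw [List.nil_append]
    rw [← handScoreA_eq_scoreB]
    exact (handScoreA_perm _ _ (PySem.List.sorted_perm _ _ _)).symm
  · intro v hv
    rcases List.mem_map.mp hv with ⟨e, he, rfl⟩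
    refine List.mem_map.mpr ⟨sortC e, ?_, ?_⟩
    · refine (mem_foldl_stepB hand _ hS0 (sortC e)).mpr ⟨[], ?_, e, he, by rw [List.nil_append]⟩
      exact (PySem.Set.mem_ofList _ _).mpr (by simp)
    · rw [← handScoreA_eq_scoreB]
      exact handScoreA_perm _ _ (PySem.List.sorted_perm _ _ _)
  · intro hmapnil
    have hstates := List.map_eq_nil_iff.mp hmapnil
    rcases List.exists_mem_of_ne_nil _ (possA_ne_nil hand) with ⟨e, he⟩
    have : sortC e ∈ hand.foldl stepB (PySem.Set.ofList [([] : List Char)]) :=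
      (mem_foldl_stepB hand _ hS0 (sortC e)).mpr
        ⟨[], (PySem.Set.mem_ofList _ _).mpr (by simp), e, he, by rw [List.nil_append]⟩
    rw [hstates] at this
    exact List.not_mem_nil this

-- ===== VERDICT (by name: the statement is the Claim_ definition above) =====
theorem part_2_spec : Claim_equal_part_2 := by
  intro hands _
  unfold Spec_part_2 part_2 part_2_alt
  have hk1 : (fun hand : String × Int => (strengthA hand.1.toList remapA 2).1) =
      (fun hand : String × Int => bestB hand.1.toList) := by
    funext h
    simp [strengthA, best_eq]
  have hk2 : (fun hand : String × Int => (strengthA hand.1.toList remapA 2).2) =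
      (fun hand : String × Int => hand.1.toList.map (fun c => remapB.getD c c)) := by
    funext h
    simp only [strengthA, PySem.List.foldl_append_singleton_eq_map, List.nil_append]
    norm_num [remapA, remapB]
  rw [hk1, hk2, PySem.List.foldl_add]
  simp
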